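-- pv_equiv track=rewrite | github.com/jirijanecek77/coding-challenges | src/main/python/advent/year_2024/aoc_18.py | find_by_bisection
-- ===== SOURCE A (Python) =====
-- from collections import deque
--
-- def shortest_path(obstacles: list[tuple[int, int]], n: int) -> int:
--     directions = [(-1, 0), (1, 0), (0, -1), (0, 1)]
--
--     # Start and end positions
--     start = (0, 0)
--     end = (n - 1, n - 1)
--
--     # BFS queue
--     queue = deque([(start, 0)])  # (current_cell, distance_from_start)
--     visited = set()
--     visited.add(start)
--
--     while queue:
--         (current_row, current_col), steps = queue.popleft()
--
--         if (current_row, current_col) == end: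
--             return steps
--
--         # Explore neighbors
--         for dr, dc in directions:
--             next_row, next_col = current_row + dr, current_col + dc
--
--             # Check bounds and if the cell is not blocked/visited
--             if 0 <= next_row < n and 0 <= next_col < n:
--                 if (next_row, next_col) not in obstacles and (
--                     next_row,
--                     next_col,
--                 ) not in visited:
--                     queue.append(((next_row, next_col), steps + 1))
--                     visited.add((next_row, next_col))
--
--     # If the queue is exhausted, there's no path
--     return 0
--
-- def find_by_bisection(n: int, obstacles: list[tuple[int, int]]) -> int:
--     left = 0
--     right = len(obstacles) - 1
--     result = -1
--     while left <= right:
--         mid = (left + right) // 2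
--         if shortest_path(obstacles[0:mid], n + 1) == 0:
--             result = mid - 1
--             right = mid - 1
--         else:
--             left = mid + 1
--     return result
-- ===== SOURCE B (Python) =====
-- def _reachable(obstacles, n):
--     """Iterative DFS flood-fill: is (n-1,n-1) reachable from (0,0)?"""
--     goal = (n - 1, n - 1)
--     blocked = set(obstacles)
--     stack = [(0, 0)]
--     seen = set()
--     while stack:
--         cell = stack.pop()
--         if cell == goal:
--             return True
--         if cell in seen:
--             continue
--         seen.add(cell)
--         r, c = cell
--         for nb in ((r - 1, c), (r + 1, c), (r, c - 1), (r, c + 1)):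
--             if 0 <= nb[0] < n and 0 <= nb[1] < n and nb not in blocked and nb not in seen:
--                 stack.append(nb)
--     return False
--
--
-- def find_by_bisection(n: int, obstacles: list[tuple[int, int]]) -> int:
--     left = 0
--     right = len(obstacles) - 1
--     result = -1
--     while left <= right:
--         mid = (left + right) // 2
--         if not _reachable(obstacles[0:mid], n + 1):
--             result = mid - 1
--             right = mid - 1
--         else:
--             left = mid + 1
--     return result
-- ===== Notes on version B (the rewrite author's own statement) =====
-- stated objective: faster
-- what changed: The path check is an iterative DFS flood-fill over a hashed obstacle set with no distance tracking, replacing A's BFS queue that carries per-cell distances and rescans the obstacle list for every neighbour test; the surrounding binary search is kept. Intended as faster; a timing run measured B 2-4x faster than A at the largest sizes where both finished, but both time out on the largest rungs, so the speed-up is unconfirmed at scale.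
import Mathlib
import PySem

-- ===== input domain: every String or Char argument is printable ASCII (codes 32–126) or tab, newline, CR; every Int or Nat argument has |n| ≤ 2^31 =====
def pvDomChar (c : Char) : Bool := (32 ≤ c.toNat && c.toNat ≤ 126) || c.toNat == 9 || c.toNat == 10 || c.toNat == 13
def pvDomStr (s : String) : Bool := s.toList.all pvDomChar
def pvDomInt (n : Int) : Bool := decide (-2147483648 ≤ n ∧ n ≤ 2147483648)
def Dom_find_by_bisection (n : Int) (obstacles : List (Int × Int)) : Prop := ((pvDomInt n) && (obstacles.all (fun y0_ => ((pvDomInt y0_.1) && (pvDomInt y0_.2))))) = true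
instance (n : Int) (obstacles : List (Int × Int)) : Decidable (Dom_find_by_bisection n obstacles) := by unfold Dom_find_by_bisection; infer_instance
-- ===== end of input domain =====

-- B replaces A's distance-tracking BFS (with an O(L) obstacle-list scan per neighbour test)
-- by an iterative DFS flood-fill over a hashed obstacle set; the binary search is kept.

-- ===== PORT A =====

-- Python's deque is ported as a two-list functional queue (same element sequence, O(1) ends);
-- Python's O(1) hash sets are ported as Std.HashSet (membership only, no iteration).

def pvToList {α : Type} (q : List α × List α) : List α := q.1 ++ q.2.reverse

def pvDeq {α : Type} (q : List α × List α) : Option (α × (List α × List α)) :=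
  match q with
  | (x :: f, b) => some (x, (f, b))
  | ([], b) =>
    match b.reverse with
    | [] => none
    | x :: f => some (x, (f, []))

theorem pvDeq_some {α : Type} (q : List α × List α) (x : α) (q' : List α × List α)
    (h : pvDeq q = some (x, q')) : pvToList q = x :: pvToList q' := by
  obtain ⟨f, b⟩ := q
  cases f with
  | cons y f =>
    simp only [pvDeq, Option.some.injEq, Prod.mk.injEq] at h
    obtain ⟨⟨rfl, rfl⟩, rfl⟩ := h
    simp [pvToList]
  | nil =>
    simp only [pvDeq] at h
    cases hb : b.reverse with
    | nil => rw [hb] at h; simp at h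
    | cons y f2 =>
      rw [hb] at h
      simp only [Option.some.injEq, Prod.mk.injEq] at h
      obtain ⟨⟨rfl, rfl⟩, rfl⟩ := h
      simp [pvToList, hb]

-- shared proof-side measure for the two searches' termination (not part of either algorithm)
def pvFree (n : Int) (v : Std.HashSet (Int × Int)) : Nat :=
  ((List.range n.toNat) ×ˢ (List.range n.toNat)).countP
    (fun p => !(v.contains ((p.1 : Int), (p.2 : Int))))

theorem pvCountP_lt {α : Type} {l : List α} {p q : α → Bool}
    (himp : ∀ x ∈ l, q x = true → p x = true) {x : α} (hx : x ∈ l)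
    (hp : p x = true) (hq : q x = false) : l.countP q < l.countP p := by
  obtain ⟨s, t, rfl⟩ := List.append_of_mem hx
  have h1 : List.countP q s ≤ List.countP p s :=
    List.countP_mono_left (fun a ha h => himp a (by simp [ha]) h)
  have h2 : List.countP q t ≤ List.countP p t :=
    List.countP_mono_left (fun a ha h => himp a (by simp [ha]) h)
  simp [List.countP_append, hp, hq]
  omega

theorem pvMemIns {m : Std.HashSet (Int × Int)} {k a : Int × Int} :
    a ∈ m.insert k ↔ a ∈ m ∨ a = k := by
  rw [Std.HashSet.mem_insert, beq_iff_eq]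
  constructor
  · rintro (rfl | h)
    · exact Or.inr rfl
    · exact Or.inl h
  · rintro (h | rfl)
    · exact Or.inr h
    · exact Or.inl rfl

theorem pvFree_add_lt (n : Int) (v : Std.HashSet (Int × Int)) (x : Int × Int)
    (hb : 0 ≤ x.1 ∧ x.1 < n ∧ 0 ≤ x.2 ∧ x.2 < n) (hx : x ∉ v) :
    pvFree n (v.insert x) < pvFree n v := by
  have hc1 : ((x.1.toNat : Int)) = x.1 := Int.toNat_of_nonneg hb.1
  have hc2 : ((x.2.toNat : Int)) = x.2 := Int.toNat_of_nonneg hb.2.2.1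
  unfold pvFree
  apply pvCountP_lt (x := (x.1.toNat, x.2.toNat))
  · intro a _ h
    simp only [Bool.not_eq_eq_eq_not, Bool.not_true, Std.HashSet.contains_eq_false_iff_not_mem] at h ⊢
    intro hm
    exact h (pvMemIns.mpr (Or.inl hm))
  · rw [List.mem_product]
    constructor <;> rw [List.mem_range] <;> omega
  · simp only [Bool.not_eq_eq_eq_not, Bool.not_true, Std.HashSet.contains_eq_false_iff_not_mem,
      hc1, hc2]
    simpa using hx
  · simp only [Bool.not_eq_false', hc1, hc2]
    rw [Std.HashSet.contains_iff_mem]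
    exact pvMemIns.mpr (Or.inr (by simp))

def pvDirs : List (Int × Int) := [(-1, 0), (1, 0), (0, -1), (0, 1)]

def pvExpand (o : List (Int × Int)) (n : Int) (cur : Int × Int) (steps : Int)
    (st : (List ((Int × Int) × Int) × List ((Int × Int) × Int)) × Std.HashSet (Int × Int))
    (d : Int × Int) :
    (List ((Int × Int) × Int) × List ((Int × Int) × Int)) × Std.HashSet (Int × Int) :=
  if 0 ≤ cur.1 + d.1 ∧ cur.1 + d.1 < n ∧ 0 ≤ cur.2 + d.2 ∧ cur.2 + d.2 < n ∧
      (cur.1 + d.1, cur.2 + d.2) ∉ o ∧ (cur.1 + d.1, cur.2 + d.2) ∉ st.2 then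
    ((st.1.1, ((cur.1 + d.1, cur.2 + d.2), steps + 1) :: st.1.2),
      st.2.insert (cur.1 + d.1, cur.2 + d.2))
  else st

theorem pvExpand_measure (o : List (Int × Int)) (n : Int) (cur : Int × Int) (steps : Int)
    (st : (List ((Int × Int) × Int) × List ((Int × Int) × Int)) × Std.HashSet (Int × Int))
    (d : Int × Int) :
    5 * pvFree n (pvExpand o n cur steps st d).2 + (pvToList (pvExpand o n cur steps st d).1).length ≤
      5 * pvFree n st.2 + (pvToList st.1).length := by
  unfold pvExpand
  split
  · next h =>
    have h1 := pvFree_add_lt n st.2 (cur.1 + d.1, cur.2 + d.2)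
      ⟨h.1, h.2.1, h.2.2.1, h.2.2.2.1⟩ h.2.2.2.2.2
    simp only [pvToList, List.reverse_cons, List.length_append, List.length_reverse,
      List.length_cons, List.length_nil]
    omega
  · exact le_refl _

theorem pvExpand_foldl_measure (o : List (Int × Int)) (n : Int) (cur : Int × Int) (steps : Int)
    (L : List (Int × Int)) :
    ∀ st, 5 * pvFree n (L.foldl (pvExpand o n cur steps) st).2 +
        (pvToList (L.foldl (pvExpand o n cur steps) st).1).length ≤
        5 * pvFree n st.2 + (pvToList st.1).length := by
  induction L with
  | nil => intro st; exact le_refl _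
  | cons d L ih =>
    intro st
    calc _ ≤ _ := ih (pvExpand o n cur steps st d)
    _ ≤ _ := pvExpand_measure o n cur steps st d

def pvBfs (o : List (Int × Int)) (n : Int)
    (q : List ((Int × Int) × Int) × List ((Int × Int) × Int))
    (v : Std.HashSet (Int × Int)) : Int :=
  match hq : pvDeq q with
  | none => 0
  | some ((cur, steps), q') =>
    if cur = (n - 1, n - 1) then steps
    else
      let st := pvDirs.foldl (pvExpand o n cur steps) (q', v)
      pvBfs o n st.1 st.2
termination_by 5 * pvFree n v + (pvToList q).length
decreasing_by
  have hmeas := pvExpand_foldl_measure o n cur steps pvDirs (q', v)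
  dsimp only at hmeas
  have hL := pvDeq_some q (cur, steps) q' hq
  have : (pvToList q).length = (pvToList q').length + 1 := by rw [hL]; rfl
  omega

def shortest_path (obstacles : List (Int × Int)) (n : Int) : Int :=
  pvBfs obstacles n ([(((0 : Int), (0 : Int)), 0)], [])
    ((∅ : Std.HashSet (Int × Int)).insert ((0 : Int), (0 : Int)))

def pvBisectA (n : Int) (obstacles : List (Int × Int)) (left right result : Int) : Int :=
  if h : left ≤ right then
    let mid := PySem.Int.floordiv (left + right) 2
    if shortest_path (PySem.List.slice obstacles (some 0) (some mid)) (n + 1) = 0 then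
      pvBisectA n obstacles left (mid - 1) (mid - 1)
    else
      pvBisectA n obstacles (mid + 1) right result
  else result
termination_by (right - left + 1).toNat
decreasing_by
  · have := PySem.Int.floordiv_two_mid_bounds h
    omega
  · have := PySem.Int.floordiv_two_mid_bounds h
    omega

def find_by_bisection (n : Int) (obstacles : List (Int × Int)) : Int :=
  pvBisectA n obstacles 0 ((obstacles.length : Int) - 1) (-1)

-- ===== PORT B =====

def pvInB (n : Int) (c : Int × Int) : Prop := 0 ≤ c.1 ∧ c.1 < n ∧ 0 ≤ c.2 ∧ c.2 < n

-- the four neighbour cells, in B's iteration order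
def pvNbrs (c : Int × Int) : List (Int × Int) :=
  [(c.1 - 1, c.2), (c.1 + 1, c.2), (c.1, c.2 - 1), (c.1, c.2 + 1)]

def pvPush (bset : Std.HashSet (Int × Int)) (n : Int) (seen : Std.HashSet (Int × Int))
    (st : List (Int × Int)) (nb : Int × Int) : List (Int × Int) :=
  if 0 ≤ nb.1 ∧ nb.1 < n ∧ 0 ≤ nb.2 ∧ nb.2 < n ∧ nb ∉ bset ∧ nb ∉ seen then nb :: st else st

-- the stack only ever holds the start cell or in-bounds cells (totality invariant)
def pvOkStack (n : Int) (stack : List (Int × Int)) : Prop :=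
  ∀ c ∈ stack, c = ((0 : Int), (0 : Int)) ∨ pvInB n c

theorem pvMem_foldl_pvPush {bset : Std.HashSet (Int × Int)} {n : Int}
    {seen : Std.HashSet (Int × Int)} (L : List (Int × Int)) :
    ∀ st c, c ∈ L.foldl (pvPush bset n seen) st →
      c ∈ st ∨ (c ∈ L ∧ pvInB n c ∧ c ∉ bset ∧ c ∉ seen) := by
  induction L with
  | nil => intro st c hc; exact Or.inl hc
  | cons nb L ih =>
    intro st c hc
    rcases ih _ c hc with h | h
    · unfold pvPush at h
      split at h
      · next hcond =>
        rcases List.mem_cons.mp h with rfl | h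
        · exact Or.inr ⟨List.mem_cons_self, ⟨hcond.1, hcond.2.1, hcond.2.2.1, hcond.2.2.2.1⟩,
            hcond.2.2.2.2.1, hcond.2.2.2.2.2⟩
        · exact Or.inl h
      · exact Or.inl h
    · exact Or.inr ⟨List.mem_cons_of_mem _ h.1, h.2⟩

theorem pvLength_foldl_pvPush {bset : Std.HashSet (Int × Int)} {n : Int}
    {seen : Std.HashSet (Int × Int)} (L : List (Int × Int)) :
    ∀ st, (L.foldl (pvPush bset n seen) st).length ≤ st.length + L.length := by
  induction L with
  | nil => intro st; simp
  | cons nb L ih =>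
    intro st
    have h := ih (pvPush bset n seen st nb)
    have h2 : (pvPush bset n seen st nb).length ≤ st.length + 1 := by
      unfold pvPush; split <;> simp
    simp only [List.foldl_cons, List.length_cons]
    omega

theorem pvFoldl_pvPush_of_nonpos {bset : Std.HashSet (Int × Int)} {n : Int}
    {seen : Std.HashSet (Int × Int)} (hn : n ≤ 0) (L : List (Int × Int)) :
    ∀ st, L.foldl (pvPush bset n seen) st = st := by
  induction L with
  | nil => intro st; rfl
  | cons nb L ih =>
    intro st
    simp only [List.foldl_cons]
    rw [show pvPush bset n seen st nb = st by
      unfold pvPush; rw [if_neg]; rintro ⟨h1, h2, _⟩; omega]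
    exact ih st

theorem pvFree_of_nonpos {n : Int} (hn : n ≤ 0) (v : Std.HashSet (Int × Int)) : pvFree n v = 0 := by
  unfold pvFree
  rw [Int.toNat_of_nonpos hn]
  simp

def pvDfs (bset : Std.HashSet (Int × Int)) (n : Int)
    (stack : List (Int × Int)) (seen : Std.HashSet (Int × Int)) (h : pvOkStack n stack) : Bool :=
  match stack, h with
  | [], _ => false
  | cell :: rest, h =>
    if cell = (n - 1, n - 1) then true
    else if cell ∈ seen then
      pvDfs bset n rest seen (fun c hc => h c (List.mem_cons_of_mem _ hc))
    else
      pvDfs bset n ((pvNbrs cell).foldl (pvPush bset n (seen.insert cell)) rest)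
        (seen.insert cell)
        (by
          intro c hc
          rcases pvMem_foldl_pvPush (pvNbrs cell) rest c hc with hm | hm
          · exact h c (List.mem_cons_of_mem _ hm)
          · exact Or.inr hm.2.1)
termination_by 5 * pvFree n seen + stack.length
decreasing_by
  · simp only [List.length_cons]; omega
  · by_cases hin : pvInB n cell
    · have h1 := pvFree_add_lt n seen cell hin (by assumption)
      have h2 := pvLength_foldl_pvPush (bset := bset) (n := n) (seen := seen.insert cell)
        (pvNbrs cell) rest
      simp only [pvNbrs, List.length_cons, List.length_nil] at h2 ⊢
      omega
    · rcases h cell List.mem_cons_self with rfl | hc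
      · have hn : n ≤ 0 := by
          unfold pvInB at hin
          simp only [not_and, not_lt] at hin
          omega
        rw [pvFoldl_pvPush_of_nonpos hn]
        rw [pvFree_of_nonpos hn, pvFree_of_nonpos hn]
        simp only [List.length_cons]
        omega
      · exact absurd hc hin

def pvReachable (obstacles : List (Int × Int)) (n : Int) : Bool :=
  pvDfs (Std.HashSet.ofList obstacles) n [((0 : Int), (0 : Int))] (∅ : Std.HashSet (Int × Int))
    (by intro c hc; simp at hc; exact Or.inl hc)

def pvBisectB (n : Int) (obstacles : List (Int × Int)) (left right result : Int) : Int :=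
  if h : left ≤ right then
    let mid := PySem.Int.floordiv (left + right) 2
    if pvReachable (PySem.List.slice obstacles (some 0) (some mid)) (n + 1) = false then
      pvBisectB n obstacles left (mid - 1) (mid - 1)
    else
      pvBisectB n obstacles (mid + 1) right result
  else result
termination_by (right - left + 1).toNat
decreasing_by
  · have := PySem.Int.floordiv_two_mid_bounds h
    omega
  · have := PySem.Int.floordiv_two_mid_bounds h
    omega

def find_by_bisection_alt (n : Int) (obstacles : List (Int × Int)) : Int :=
  pvBisectB n obstacles 0 ((obstacles.length : Int) - 1) (-1)

-- ===== PRECONDITION & SPEC =====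
def Spec_find_by_bisection (n : Int) (obstacles : List (Int × Int)) (out : Int) : Prop := out = find_by_bisection_alt n obstacles
instance (n : Int) (obstacles : List (Int × Int)) (out : Int) : Decidable (Spec_find_by_bisection n obstacles out) := by unfold Spec_find_by_bisection; infer_instance

-- ===== CLAIM (what is proved, stated in full; the proofs are below) =====
def Claim_equal_find_by_bisection : Prop := ∀ (n : Int) (obstacles : List (Int × Int)), Dom_find_by_bisection n obstacles → Spec_find_by_bisection n obstacles (find_by_bisection n obstacles)

-- ===== LEMMAS AND PROOFS =====

def pvEdge (o : List (Int × Int)) (n : Int) (a b : Int × Int) : Prop :=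
  b ∈ pvNbrs a ∧ pvInB n b ∧ b ∉ o

inductive pvReach (o : List (Int × Int)) (n : Int) : (Int × Int) → Prop
  | refl : pvReach o n ((0 : Int), (0 : Int))
  | step {a b : Int × Int} : pvReach o n a → pvEdge o n a b → pvReach o n b

theorem pvDeq_none {α : Type} (q : List α × List α) (h : pvDeq q = none) : pvToList q = [] := by
  obtain ⟨f, b⟩ := q
  cases f with
  | cons x f => simp [pvDeq] at h
  | nil =>
    simp only [pvDeq] at h
    cases hb : b.reverse with
    | nil => simp [pvToList, hb]
    | cons x f => rw [hb] at h; simp at h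

theorem pvMemOfList {l : List (Int × Int)} {a : Int × Int} :
    a ∈ Std.HashSet.ofList l ↔ a ∈ l := by
  simp [Std.HashSet.mem_ofList]

theorem pvReach_mem (o : List (Int × Int)) (n : Int) (v : Std.HashSet (Int × Int))
    (hs : ((0 : Int), (0 : Int)) ∈ v)
    (hcl : ∀ a ∈ v, ∀ b, pvEdge o n a b → b ∈ v) :
    ∀ c, pvReach o n c → c ∈ v := by
  intro c h
  induction h with
  | refl => exact hs
  | step _ he ih => exact hcl _ ih _ he

-- ---- BFS side ----

-- list-level view of pvExpand (the queue flattened by pvToList)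
def pvExpandL (o : List (Int × Int)) (n : Int) (cur : Int × Int) (steps : Int)
    (st : List ((Int × Int) × Int) × Std.HashSet (Int × Int)) (d : Int × Int) :
    List ((Int × Int) × Int) × Std.HashSet (Int × Int) :=
  if 0 ≤ cur.1 + d.1 ∧ cur.1 + d.1 < n ∧ 0 ≤ cur.2 + d.2 ∧ cur.2 + d.2 < n ∧
      (cur.1 + d.1, cur.2 + d.2) ∉ o ∧ (cur.1 + d.1, cur.2 + d.2) ∉ st.2 then
    (st.1 ++ [((cur.1 + d.1, cur.2 + d.2), steps + 1)],
      st.2.insert (cur.1 + d.1, cur.2 + d.2))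
  else st

theorem pvExpand_commute (o : List (Int × Int)) (n : Int) (cur : Int × Int) (steps : Int)
    (st : (List ((Int × Int) × Int) × List ((Int × Int) × Int)) × Std.HashSet (Int × Int))
    (d : Int × Int) :
    (pvToList (pvExpand o n cur steps st d).1, (pvExpand o n cur steps st d).2) =
      pvExpandL o n cur steps (pvToList st.1, st.2) d := by
  unfold pvExpand pvExpandL
  dsimp only
  split_ifs with h
  · simp [pvToList]
  · rfl

theorem pvFoldl_commute (o : List (Int × Int)) (n : Int) (cur : Int × Int) (steps : Int)
    (L : List (Int × Int)) :
    ∀ st, (pvToList (L.foldl (pvExpand o n cur steps) st).1,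
        (L.foldl (pvExpand o n cur steps) st).2) =
      L.foldl (pvExpandL o n cur steps) (pvToList st.1, st.2) := by
  induction L with
  | nil => intro st; rfl
  | cons d L ih =>
    intro st
    simp only [List.foldl_cons]
    exact (ih (pvExpand o n cur steps st d)).trans
      (by rw [pvExpand_commute o n cur steps st d])

structure pvInvA (o : List (Int × Int)) (n : Int) (q : List ((Int × Int) × Int))
    (v : Std.HashSet (Int × Int)) : Prop where
  start_mem : ((0 : Int), (0 : Int)) ∈ v
  q_mem : ∀ p ∈ q, p.1 ∈ v
  v_reach : ∀ c ∈ v, pvReach o n c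
  q_steps : ∀ p ∈ q, 0 ≤ p.2 ∧ (p.2 = 0 → p.1 = ((0 : Int), (0 : Int)))
  q_nodup : (q.map Prod.fst).Nodup
  processed : ∀ a ∈ v, a ∉ q.map Prod.fst → ∀ b, pvEdge o n a b → b ∈ v
  end_q : ((n - 1 : Int), (n - 1 : Int)) ∈ v → ((n - 1 : Int), (n - 1 : Int)) ∈ q.map Prod.fst

structure pvMid (o : List (Int × Int)) (n : Int) (cur : Int × Int) (v0 : Std.HashSet (Int × Int))
    (st : List ((Int × Int) × Int) × Std.HashSet (Int × Int)) : Prop where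
  start_mem : ((0 : Int), (0 : Int)) ∈ st.2
  q_mem : ∀ p ∈ st.1, p.1 ∈ st.2
  v_reach : ∀ c ∈ st.2, pvReach o n c
  q_steps : ∀ p ∈ st.1, 0 ≤ p.2 ∧ (p.2 = 0 → p.1 = ((0 : Int), (0 : Int)))
  q_nodup : (st.1.map Prod.fst).Nodup
  v_mono : ∀ c ∈ v0, c ∈ st.2
  semi : ∀ a ∈ st.2, a ∉ st.1.map Prod.fst → a ≠ cur → ∀ b, pvEdge o n a b → b ∈ st.2
  end_q : ((n - 1 : Int), (n - 1 : Int)) ∈ st.2 →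
    ((n - 1 : Int), (n - 1 : Int)) ∈ st.1.map Prod.fst

theorem pvMid_step (o : List (Int × Int)) (n : Int) (cur : Int × Int)
    (v0 : Std.HashSet (Int × Int)) (steps : Int) (d : Int × Int)
    (hd : (cur.1 + d.1, cur.2 + d.2) ∈ pvNbrs cur)
    (hreach : pvReach o n cur) (hsteps : 0 ≤ steps)
    (st : List ((Int × Int) × Int) × Std.HashSet (Int × Int)) (hm : pvMid o n cur v0 st) :
    pvMid o n cur v0 (pvExpandL o n cur steps st d) ∧
    (∀ c ∈ st.2, c ∈ (pvExpandL o n cur steps st d).2) ∧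
    (∀ b : Int × Int, b = (cur.1 + d.1, cur.2 + d.2) → pvInB n b → b ∉ o →
      b ∈ (pvExpandL o n cur steps st d).2) := by
  unfold pvExpandL
  by_cases hC : 0 ≤ cur.1 + d.1 ∧ cur.1 + d.1 < n ∧ 0 ≤ cur.2 + d.2 ∧ cur.2 + d.2 < n ∧
      (cur.1 + d.1, cur.2 + d.2) ∉ o ∧ (cur.1 + d.1, cur.2 + d.2) ∉ st.2
  · rw [if_pos hC]
    obtain ⟨h1, h2, h3, h4, h5, h6⟩ := hC
    refine ⟨⟨?_, ?_, ?_, ?_, ?_, ?_, ?_, ?_⟩, ?_, ?_⟩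
    · rw [pvMemIns]; exact Or.inl hm.start_mem
    · intro p hp
      rcases List.mem_append.mp hp with hp | hp
      · rw [pvMemIns]; exact Or.inl (hm.q_mem p hp)
      · simp only [List.mem_cons, List.not_mem_nil, or_false] at hp
        subst hp
        rw [pvMemIns]; exact Or.inr rfl
    · intro c hc
      rcases pvMemIns.mp hc with hc | hc
      · exact hm.v_reach c hc
      · subst hc
        exact pvReach.step hreach ⟨hd, ⟨h1, h2, h3, h4⟩, h5⟩
    · intro p hp
      rcases List.mem_append.mp hp with hp | hp
      · exact hm.q_steps p hp
      · simp only [List.mem_cons, List.not_mem_nil, or_false] at hp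
        subst hp
        exact ⟨by omega, by intro h; omega⟩
    · rw [List.map_append]
      simp only [List.map_cons, List.map_nil]
      apply List.Nodup.append hm.q_nodup (List.nodup_singleton _)
      intro a ha hb
      simp only [List.mem_cons, List.not_mem_nil, or_false] at hb
      subst hb
      rcases List.mem_map.mp ha with ⟨p, hp, hp2⟩
      exact h6 (hp2 ▸ hm.q_mem p hp)
    · intro c hc
      rw [pvMemIns]; exact Or.inl (hm.v_mono c hc)
    · intro a ha haq hac b hb
      rw [List.map_append] at haq
      simp only [List.map_cons, List.map_nil, List.mem_append, List.mem_cons,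
        List.not_mem_nil, or_false, not_or] at haq
      rcases pvMemIns.mp ha with ha | ha
      · rw [pvMemIns]
        exact Or.inl (hm.semi a ha haq.1 hac b hb)
      · exact absurd ha haq.2
    · intro he
      rw [List.map_append]
      simp only [List.map_cons, List.map_nil, List.mem_append, List.mem_cons,
        List.not_mem_nil, or_false]
      rcases pvMemIns.mp he with he | he
      · exact Or.inl (hm.end_q he)
      · exact Or.inr he
    · intro c hc
      rw [pvMemIns]; exact Or.inl hc
    · intro b hb _ _
      subst hb
      rw [pvMemIns]; exact Or.inr rfl
  · rw [if_neg hC]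
    refine ⟨hm, fun c hc => hc, ?_⟩
    intro b hb hI ho
    subst hb
    unfold pvInB at hI
    dsimp only at hI
    by_contra hmem
    exact hC ⟨hI.1, hI.2.1, hI.2.2.1, hI.2.2.2, ho, hmem⟩

theorem pvRound (o : List (Int × Int)) (n : Int) (cur : Int × Int) (steps : Int)
    (rest : List ((Int × Int) × Int)) (v : Std.HashSet (Int × Int))
    (hreach : pvReach o n cur) (hsteps : 0 ≤ steps)
    (hm : pvMid o n cur v (rest, v)) :
    pvMid o n cur v (pvDirs.foldl (pvExpandL o n cur steps) (rest, v)) ∧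
    (∀ b, pvEdge o n cur b → b ∈ (pvDirs.foldl (pvExpandL o n cur steps) (rest, v)).2) := by
  have e1 : ((cur.1 - 1, cur.2) : Int × Int) = (cur.1 + (-1 : Int), cur.2 + (0 : Int)) := by
    rw [Prod.mk.injEq]; exact ⟨by ring, by ring⟩
  have e2 : ((cur.1 + 1, cur.2) : Int × Int) = (cur.1 + (1 : Int), cur.2 + (0 : Int)) := by
    rw [Prod.mk.injEq]; exact ⟨by ring, by ring⟩
  have e3 : ((cur.1, cur.2 - 1) : Int × Int) = (cur.1 + (0 : Int), cur.2 + (-1 : Int)) := by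
    rw [Prod.mk.injEq]; exact ⟨by ring, by ring⟩
  have e4 : ((cur.1, cur.2 + 1) : Int × Int) = (cur.1 + (0 : Int), cur.2 + (1 : Int)) := by
    rw [Prod.mk.injEq]; exact ⟨by ring, by ring⟩
  have hn1 : (cur.1 + (-1 : Int), cur.2 + (0 : Int)) ∈ pvNbrs cur := by
    rw [← e1]; simp [pvNbrs]
  have hn2 : (cur.1 + (1 : Int), cur.2 + (0 : Int)) ∈ pvNbrs cur := by
    rw [← e2]; simp [pvNbrs]
  have hn3 : (cur.1 + (0 : Int), cur.2 + (-1 : Int)) ∈ pvNbrs cur := by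
    rw [← e3]; simp [pvNbrs]
  have hn4 : (cur.1 + (0 : Int), cur.2 + (1 : Int)) ∈ pvNbrs cur := by
    rw [← e4]; simp [pvNbrs]
  simp only [pvDirs, List.foldl_cons, List.foldl_nil]
  obtain ⟨m1, mo1, c1⟩ := pvMid_step o n cur v steps (-1, 0) hn1 hreach hsteps (rest, v) hm
  obtain ⟨m2, mo2, c2⟩ := pvMid_step o n cur v steps (1, 0) hn2 hreach hsteps _ m1
  obtain ⟨m3, mo3, c3⟩ := pvMid_step o n cur v steps (0, -1) hn3 hreach hsteps _ m2
  obtain ⟨m4, mo4, c4⟩ := pvMid_step o n cur v steps (0, 1) hn4 hreach hsteps _ m3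
  refine ⟨m4, ?_⟩
  intro b hb
  obtain ⟨hbn, hbI, hbo⟩ := hb
  simp only [pvNbrs, List.mem_cons, List.not_mem_nil, or_false] at hbn
  rcases hbn with rfl | rfl | rfl | rfl
  · exact mo4 _ (mo3 _ (mo2 _ (c1 _ e1 hbI hbo)))
  · exact mo4 _ (mo3 _ (c2 _ e2 hbI hbo))
  · exact mo4 _ (c3 _ e3 hbI hbo)
  · exact c4 _ e4 hbI hbo

theorem pvInvA_preserved (o : List (Int × Int)) (n : Int) (cur : Int × Int) (steps : Int)
    (rest : List ((Int × Int) × Int)) (v : Std.HashSet (Int × Int))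
    (hInv : pvInvA o n ((cur, steps) :: rest) v) (hcur : cur ≠ (n - 1, n - 1)) :
    pvInvA o n (pvDirs.foldl (pvExpandL o n cur steps) (rest, v)).1
      (pvDirs.foldl (pvExpandL o n cur steps) (rest, v)).2 := by
  have hcv : cur ∈ v := hInv.q_mem _ List.mem_cons_self
  have hreach := hInv.v_reach cur hcv
  have hsteps := (hInv.q_steps _ List.mem_cons_self).1
  have hm0 : pvMid o n cur v (rest, v) := by
    refine ⟨hInv.start_mem, ?_, hInv.v_reach, ?_, ?_, fun c hc => hc, ?_, ?_⟩
    · intro p hp; exact hInv.q_mem p (List.mem_cons_of_mem _ hp)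
    · intro p hp; exact hInv.q_steps p (List.mem_cons_of_mem _ hp)
    · exact (List.nodup_cons.mp hInv.q_nodup).2
    · intro a ha haq hac b hb
      apply hInv.processed a ha _ b hb
      simp only [List.map_cons, List.mem_cons, not_or]
      exact ⟨hac, haq⟩
    · intro he
      have := hInv.end_q he
      simp only [List.map_cons, List.mem_cons] at this
      rcases this with h | h
      · exact absurd h.symm (by simpa using hcur)
      · exact h
  obtain ⟨hm, hcov⟩ := pvRound o n cur steps rest v hreach hsteps hm0
  refine ⟨hm.start_mem, hm.q_mem, hm.v_reach, hm.q_steps, hm.q_nodup, ?_, hm.end_q⟩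
  intro a ha haq b hb
  by_cases hac : a = cur
  · subst hac; exact hcov b hb
  · exact hm.semi a ha haq hac b hb

theorem pvBfs_eq_zero_iff (o : List (Int × Int)) (n : Int)
    (hne : ((n - 1 : Int), (n - 1 : Int)) ≠ ((0 : Int), (0 : Int))) :
    ∀ (N : Nat) (q : List ((Int × Int) × Int) × List ((Int × Int) × Int))
      (v : Std.HashSet (Int × Int)),
      5 * pvFree n v + (pvToList q).length = N → pvInvA o n (pvToList q) v →
      (pvBfs o n q v = 0 ↔ ¬ pvReach o n (n - 1, n - 1)) := by
  intro N
  induction N using Nat.strong_induction_on with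
  | _ N IH =>
    intro q v hN hInv
    rw [pvBfs.eq_def]
    split
    · next hq0 =>
      have hL := pvDeq_none q hq0
      rw [hL] at hInv
      simp only [true_iff]
      intro hr
      have hm := pvReach_mem o n v hInv.start_mem
        (fun a ha b hb => hInv.processed a ha (by simp) b hb) _ hr
      have := hInv.end_q hm
      simp at this
    · next cur steps q' hq0 =>
      have hL := pvDeq_some q (cur, steps) q' hq0
      rw [hL] at hInv
      rw [hL] at hN
      by_cases hc : cur = (n - 1, n - 1)
      · rw [if_pos hc]
        have h1 := hInv.q_steps _ (List.mem_cons_self (a := (cur, steps)))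
        have hs0 : steps ≠ 0 := fun h => hne (hc ▸ h1.2 h)
        have hre : pvReach o n (n - 1, n - 1) :=
          hc ▸ hInv.v_reach cur (hInv.q_mem _ List.mem_cons_self)
        constructor
        · intro h; exact absurd h hs0
        · intro hnr; exact (hnr hre).elim
      · rw [if_neg hc]
        show pvBfs o n (pvDirs.foldl (pvExpand o n cur steps) (q', v)).1
          (pvDirs.foldl (pvExpand o n cur steps) (q', v)).2 = 0 ↔ _
        have hmeas := pvExpand_foldl_measure o n cur steps pvDirs (q', v)
        dsimp only at hmeas
        have hInv' := pvInvA_preserved o n cur steps (pvToList q') v hInv hc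
        have hcomm := pvFoldl_commute o n cur steps pvDirs (q', v)
        dsimp only at hcomm
        rw [← hcomm] at hInv'
        dsimp only at hInv'
        apply IH (5 * pvFree n (pvDirs.foldl (pvExpand o n cur steps) (q', v)).2 +
          (pvToList (pvDirs.foldl (pvExpand o n cur steps) (q', v)).1).length)
          (by simp only [List.length_cons] at hN; omega) _ _ rfl hInv'

-- ---- DFS side ----

structure pvInvD (o : List (Int × Int)) (n : Int) (stack : List (Int × Int))
    (v : Std.HashSet (Int × Int)) : Prop where
  stack_reach : ∀ c ∈ stack, pvReach o n c
  semi : ∀ a ∈ v, ∀ b, pvEdge o n a b → b ∈ v ∨ b ∈ stack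
  end_not : ((n - 1 : Int), (n - 1 : Int)) ∉ v
  start : ((0 : Int), (0 : Int)) ∈ v ∨ ((0 : Int), (0 : Int)) ∈ stack

theorem pvMem_foldl_pvPush_of_mem {bset : Std.HashSet (Int × Int)} {n : Int}
    {seen : Std.HashSet (Int × Int)} (L : List (Int × Int)) :
    ∀ st c, c ∈ st → c ∈ L.foldl (pvPush bset n seen) st := by
  induction L with
  | nil => intro st c hc; exact hc
  | cons nb L ih =>
    intro st c hc
    apply ih
    unfold pvPush
    split
    · exact List.mem_cons_of_mem _ hc
    · exact hc

theorem pvFoldl_pvPush_covers {bset : Std.HashSet (Int × Int)} {n : Int}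
    {seen : Std.HashSet (Int × Int)} (L : List (Int × Int)) :
    ∀ st (b : Int × Int), b ∈ L → pvInB n b → b ∉ bset → b ∉ seen →
      b ∈ L.foldl (pvPush bset n seen) st := by
  induction L with
  | nil => intro st b hb; simp at hb
  | cons nb L ih =>
    intro st b hb hI h1 h2
    simp only [List.foldl_cons]
    rcases List.mem_cons.mp hb with rfl | hb
    · apply pvMem_foldl_pvPush_of_mem
      unfold pvPush
      rw [if_pos ⟨hI.1, hI.2.1, hI.2.2.1, hI.2.2.2, h1, h2⟩]
      exact List.mem_cons_self
    · exact ih _ b hb hI h1 h2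

theorem pvDfs_iff (o : List (Int × Int)) (n : Int) :
    ∀ (N : Nat) (stack : List (Int × Int)) (v : Std.HashSet (Int × Int)) (h : pvOkStack n stack),
      5 * pvFree n v + stack.length = N → pvInvD o n stack v →
      (pvDfs (Std.HashSet.ofList o) n stack v h = true ↔ pvReach o n (n - 1, n - 1)) := by
  intro N
  induction N using Nat.strong_induction_on with
  | _ N IH =>
    intro stack v h hN hInv
    match stack, h with
    | [], h =>
      have hv : pvDfs (Std.HashSet.ofList o) n [] v h = false := by rw [pvDfs.eq_def]
      rw [hv]
      simp only [Bool.false_eq_true, false_iff]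
      intro hr
      apply hInv.end_not
      apply pvReach_mem o n v _ _ _ hr
      · rcases hInv.start with hs | hs
        · exact hs
        · simp at hs
      · intro a ha b hb
        rcases hInv.semi a ha b hb with h | h
        · exact h
        · simp at h
    | cell :: rest, h =>
      by_cases h1 : cell = (n - 1, n - 1)
      · have hv : pvDfs (Std.HashSet.ofList o) n (cell :: rest) v h = true := by
          rw [pvDfs.eq_def]; simp only [if_pos h1]
        rw [hv]
        simp only [true_iff]
        exact h1 ▸ hInv.stack_reach cell List.mem_cons_self
      · by_cases h2 : cell ∈ v
        · have hv : pvDfs (Std.HashSet.ofList o) n (cell :: rest) v h =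
              pvDfs (Std.HashSet.ofList o) n rest v
                (fun c hc => h c (List.mem_cons_of_mem _ hc)) := by
            rw [pvDfs.eq_def]; simp only [if_neg h1, if_pos h2]
          rw [hv]
          apply IH (5 * pvFree n v + rest.length)
            (by simp only [List.length_cons] at hN; omega) _ _ _ rfl
          refine ⟨?_, ?_, hInv.end_not, ?_⟩
          · intro c hc; exact hInv.stack_reach c (List.mem_cons_of_mem _ hc)
          · intro a ha b hb
            rcases hInv.semi a ha b hb with hx | hx
            · exact Or.inl hx
            · rcases List.mem_cons.mp hx with rfl | hx
              · exact Or.inl h2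
              · exact Or.inr hx
          · rcases hInv.start with hs | hs
            · exact Or.inl hs
            · rcases List.mem_cons.mp hs with rfl | hs
              · exact Or.inl h2
              · exact Or.inr hs
        · have hv : pvDfs (Std.HashSet.ofList o) n (cell :: rest) v h =
              pvDfs (Std.HashSet.ofList o) n
                ((pvNbrs cell).foldl (pvPush (Std.HashSet.ofList o) n (v.insert cell)) rest)
                (v.insert cell)
                (by
                  intro c hc
                  rcases pvMem_foldl_pvPush (pvNbrs cell) rest c hc with hm | hm
                  · exact h c (List.mem_cons_of_mem _ hm)
                  · exact Or.inr hm.2.1) := by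
            rw [pvDfs.eq_def]; simp only [if_neg h1, if_neg h2]
          rw [hv]
          have hreach := hInv.stack_reach cell List.mem_cons_self
          have hlen := pvLength_foldl_pvPush (bset := Std.HashSet.ofList o) (n := n)
            (seen := v.insert cell) (pvNbrs cell) rest
          have hmeas : 5 * pvFree n (v.insert cell) +
              ((pvNbrs cell).foldl (pvPush (Std.HashSet.ofList o) n (v.insert cell)) rest).length <
              N := by
            by_cases hin : pvInB n cell
            · have hfl := pvFree_add_lt n v cell hin h2
              have h4 : (pvNbrs cell).length = 4 := rfl
              rw [h4] at hlen
              simp only [List.length_cons] at hN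
              omega
            · rcases h cell List.mem_cons_self with hc0 | hc0
              · subst hc0
                have hn : n ≤ 0 := by
                  unfold pvInB at hin
                  simp only [not_and, not_lt] at hin
                  omega
                rw [pvFoldl_pvPush_of_nonpos hn, pvFree_of_nonpos hn]
                rw [pvFree_of_nonpos hn] at hN
                simp only [List.length_cons] at hN
                omega
              · exact absurd hc0 hin
          apply IH _ hmeas _ _ _ rfl
          refine ⟨?_, ?_, ?_, ?_⟩
          · intro c hc
            rcases pvMem_foldl_pvPush (pvNbrs cell) rest c hc with hm | hm
            · exact hInv.stack_reach c (List.mem_cons_of_mem _ hm)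
            · refine pvReach.step hreach ⟨hm.1, hm.2.1, ?_⟩
              intro hco
              exact hm.2.2.1 (pvMemOfList.mpr hco)
          · intro a ha b hb
            rcases pvMemIns.mp ha with ha | ha
            · rcases hInv.semi a ha b hb with hx | hx
              · exact Or.inl (pvMemIns.mpr (Or.inl hx))
              · rcases List.mem_cons.mp hx with rfl | hx
                · exact Or.inl (pvMemIns.mpr (Or.inr rfl))
                · exact Or.inr (pvMem_foldl_pvPush_of_mem _ _ _ hx)
            · subst ha
              obtain ⟨hbn, hbI, hbo⟩ := hb
              by_cases hbs : b ∈ v.insert a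
              · exact Or.inl hbs
              · refine Or.inr (pvFoldl_pvPush_covers (pvNbrs a) rest b hbn hbI ?_ hbs)
                intro hco
                exact hbo (pvMemOfList.mp hco)
          · intro he
            rcases pvMemIns.mp he with he | he
            · exact hInv.end_not he
            · exact h1 he.symm
          · rcases hInv.start with hs | hs
            · exact Or.inl (pvMemIns.mpr (Or.inl hs))
            · rcases List.mem_cons.mp hs with hs | hs
              · exact Or.inl (pvMemIns.mpr (Or.inr hs))
              · exact Or.inr (pvMem_foldl_pvPush_of_mem _ _ _ hs)

-- ---- the two path checks agree ----

theorem pvShortest_path_iff (o : List (Int × Int)) (n : Int)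
    (hne : ((n - 1 : Int), (n - 1 : Int)) ≠ ((0 : Int), (0 : Int))) :
    (shortest_path o n = 0 ↔ ¬ pvReach o n (n - 1, n - 1)) := by
  apply pvBfs_eq_zero_iff o n hne _ _ _ rfl
  have hmem : ∀ c : Int × Int,
      c ∈ (∅ : Std.HashSet (Int × Int)).insert ((0 : Int), (0 : Int)) ↔
        c = ((0 : Int), (0 : Int)) := by
    intro c; rw [pvMemIns]; simp
  have hq : pvToList ([((((0 : Int), (0 : Int))), (0 : Int))],
      ([] : List ((Int × Int) × Int))) = [(((0 : Int), (0 : Int)), (0 : Int))] := rfl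
  rw [hq]
  refine ⟨?_, ?_, ?_, ?_, by simp, ?_, ?_⟩
  · exact (hmem _).mpr rfl
  · intro p hp
    simp only [List.mem_cons, List.not_mem_nil, or_false] at hp
    subst hp
    exact (hmem _).mpr rfl
  · intro c hc
    rw [hmem c] at hc
    subst hc
    exact pvReach.refl
  · intro p hp
    simp only [List.mem_cons, List.not_mem_nil, or_false] at hp
    subst hp
    exact ⟨le_refl _, fun _ => rfl⟩
  · intro a ha haq b hb
    rw [hmem a] at ha
    subst ha
    simp at haq
  · intro he
    rw [hmem _] at he
    simp [he]

theorem pvReachable_iff (o : List (Int × Int)) (n : Int) :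
    (pvReachable o n = true ↔ pvReach o n (n - 1, n - 1)) := by
  unfold pvReachable
  apply pvDfs_iff o n _ _ _ _ rfl
  refine ⟨?_, ?_, ?_, ?_⟩
  · intro c hc
    simp only [List.mem_cons, List.not_mem_nil, or_false] at hc
    subst hc
    exact pvReach.refl
  · intro a ha
    simp at ha
  · simp
  · exact Or.inr (by simp)

theorem pvPred_iff (n : Int) (hn : n ≠ 0) (o' : List (Int × Int)) :
    (shortest_path o' (n + 1) = 0 ↔ pvReachable o' (n + 1) = false) := by
  have hne : ((n + 1 - 1 : Int), (n + 1 - 1 : Int)) ≠ ((0 : Int), (0 : Int)) := by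
    simp only [ne_eq, Prod.mk.injEq, not_and]
    intro h; omega
  rw [pvShortest_path_iff o' (n + 1) hne, ← Bool.not_eq_true]
  exact not_congr (pvReachable_iff o' (n + 1)).symm

-- ---- the binary searches agree ----

theorem pvBisect_congr (n : Int) (o : List (Int × Int))
    (hp : ∀ o' : List (Int × Int),
      (shortest_path o' (n + 1) = 0 ↔ pvReachable o' (n + 1) = false)) :
    ∀ (N : Nat) (l r res : Int), (r - l + 1).toNat = N →
      pvBisectA n o l r res = pvBisectB n o l r res := by
  intro N
  induction N using Nat.strong_induction_on with
  | _ N IH =>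
    intro l r res hN
    by_cases hlr : l ≤ r
    · have hmid := PySem.Int.floordiv_two_mid_bounds hlr
      rw [pvBisectA.eq_def, pvBisectB.eq_def]
      rw [dif_pos hlr, dif_pos hlr]
      by_cases hc : shortest_path
          (PySem.List.slice o (some 0) (some (PySem.Int.floordiv (l + r) 2))) (n + 1) = 0
      · rw [if_pos hc, if_pos ((hp _).mp hc)]
        exact IH _ (by omega) _ _ _ rfl
      · rw [if_neg hc, if_neg (fun hb => hc ((hp _).mpr hb))]
        exact IH _ (by omega) _ _ _ rfl
    · rw [pvBisectA.eq_def, pvBisectB.eq_def, dif_neg hlr, dif_neg hlr]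

-- ---- the degenerate n = 0 grid: A's check is always "blocked", B's never, both loops give -1 ----

theorem pvShortest_path_one (o : List (Int × Int)) : shortest_path o 1 = 0 := by
  unfold shortest_path
  rw [pvBfs.eq_def]
  split
  · rfl
  · next cur steps q' hq =>
    have hL' : [((((0 : Int), (0 : Int))), (0 : Int))] = (cur, steps) :: pvToList q' := by
      simpa [pvToList] using pvDeq_some _ _ _ hq
    injection hL' with h1 h2
    injection h1 with hc hs
    subst hc
    subst hs
    norm_num

theorem pvReachable_one (o : List (Int × Int)) : pvReachable o 1 = true := by
  unfold pvReachable
  rw [pvDfs.eq_def]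
  norm_num

theorem pvBisectA_allTrue (n : Int) (o : List (Int × Int))
    (hc : ∀ m : Int, shortest_path (PySem.List.slice o (some 0) (some m)) (n + 1) = 0) :
    ∀ (N : Nat) (l r res : Int), (r - l + 1).toNat = N →
      pvBisectA n o l r res = if l ≤ r then l - 1 else res := by
  intro N
  induction N using Nat.strong_induction_on with
  | _ N IH =>
    intro l r res hN
    by_cases hlr : l ≤ r
    · have hmid := PySem.Int.floordiv_two_mid_bounds hlr
      rw [pvBisectA.eq_def, dif_pos hlr, if_pos (hc _)]
      rw [IH _ (by omega) _ _ _ rfl]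
      rw [if_pos hlr]
      split_ifs with h
      · rfl
      · have : PySem.Int.floordiv (l + r) 2 = l := by omega
        omega
    · rw [pvBisectA.eq_def, dif_neg hlr, if_neg hlr]

theorem pvBisectB_allFalse (n : Int) (o : List (Int × Int))
    (hc : ∀ m : Int, pvReachable (PySem.List.slice o (some 0) (some m)) (n + 1) = true) :
    ∀ (N : Nat) (l r res : Int), (r - l + 1).toNat = N → pvBisectB n o l r res = res := by
  intro N
  induction N using Nat.strong_induction_on with
  | _ N IH =>
    intro l r res hN
    by_cases hlr : l ≤ r
    · have hmid := PySem.Int.floordiv_two_mid_bounds hlr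
      rw [pvBisectB.eq_def, dif_pos hlr,
        if_neg (fun hb => by rw [hc (PySem.Int.floordiv (l + r) 2)] at hb; simp at hb)]
      exact IH _ (by omega) _ _ _ rfl
    · rw [pvBisectB.eq_def, dif_neg hlr]

-- ===== VERDICT (by name: the statement is the Claim_ definition above) =====
theorem find_by_bisection_spec : Claim_equal_find_by_bisection := by
  unfold Claim_equal_find_by_bisection Spec_find_by_bisection
  intro n o _
  unfold find_by_bisection find_by_bisection_alt
  by_cases hn : n = 0
  · subst hn
    rw [pvBisectA_allTrue 0 o (fun m => by norm_num; exact pvShortest_path_one _) _ 0 _ _ rfl]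
    rw [pvBisectB_allFalse 0 o (fun m => by norm_num; exact pvReachable_one _) _ 0 _ _ rfl]
    split_ifs <;> norm_num
  · exact pvBisect_congr n o (pvPred_iff n hn) _ 0 _ (-1) rfl
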